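-- pv_equiv track=rewrite | github.com/P-Programist/projecteuler | Task_28_Number_Spiral_Diagonals.py | spiral_printing
-- ===== SOURCE A (Python) =====
-- def spiral_printing(size):
-- 	side = 3
-- 	i = 1
-- 	yield (i)
-- 	while i < size**2:
-- 		for step in range(0,4):
-- 			i += side - 1
-- 			yield (i)
-- 		side += 2
-- ===== SOURCE B (Python) =====
-- def spiral_printing(size):
--     yield 1
--     side = 3
--     while (side - 2) ** 2 < size ** 2:
--         base = side * side
--         d = side - 1
--         yield base - 3 * d
--         yield base - 2 * d
--         yield base - d
--         yield base
--         side += 2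
-- ===== Notes on version B (the rewrite author's own statement) =====
-- stated objective: simpler
-- what changed: Removed A's running accumulator i (repeated addition of side-1); B computes each ring's four corners in closed form from side^2 and terminates on (side-2)^2 < size^2, which equals A's pre-ring accumulator value.
import Mathlib
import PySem

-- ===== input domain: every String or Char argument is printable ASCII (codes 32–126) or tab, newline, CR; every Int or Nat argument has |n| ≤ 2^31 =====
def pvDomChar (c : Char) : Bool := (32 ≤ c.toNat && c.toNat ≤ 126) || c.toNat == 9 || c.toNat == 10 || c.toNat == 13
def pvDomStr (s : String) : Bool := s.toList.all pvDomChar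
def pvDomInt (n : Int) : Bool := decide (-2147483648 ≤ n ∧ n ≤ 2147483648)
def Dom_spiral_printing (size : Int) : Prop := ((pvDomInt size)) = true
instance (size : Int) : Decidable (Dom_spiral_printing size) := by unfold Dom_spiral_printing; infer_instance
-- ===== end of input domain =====

-- B drops A's running accumulator i: each ring's four corners are computed in closed form
-- from side^2 (objective: simpler). Both ports list the values the Python generators yield.

-- ===== PORT A =====
-- A's while loop; the ring counter k encodes A's side = 3 + 2*k (always of this form in A).
def spiralA (size i : Int) (k : Nat) : List Int :=
  let side : Int := 3 + 2 * (k : Int)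
  if _h : i < size ^ 2 then
    let i1 := i + (side - 1)
    let i2 := i1 + (side - 1)
    let i3 := i2 + (side - 1)
    let i4 := i3 + (side - 1)
    i1 :: i2 :: i3 :: i4 :: spiralA size i4 (k + 1)
  else []
termination_by (size ^ 2 - i).toNat
decreasing_by
  have hk : (0 : Int) ≤ (k : Int) := Int.natCast_nonneg k
  omega

def spiral_printing (size : Int) : List Int := 1 :: spiralA size 1 0

-- ===== PORT B =====
-- B's while loop; side = 3 + 2*k as in Source B's side = 3, side += 2.
def spiralB (size : Int) (k : Nat) : List Int :=
  let side : Int := 3 + 2 * (k : Int)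
  if _h : (side - 2) ^ 2 < size ^ 2 then
    let base := side * side
    let d := side - 1
    (base - 3 * d) :: (base - 2 * d) :: (base - d) :: base :: spiralB size (k + 1)
  else []
termination_by (size ^ 2 - (3 + 2 * (k : Int) - 2) ^ 2).toNat
decreasing_by
  have hk : (0 : Int) ≤ (k : Int) := Int.natCast_nonneg k
  have hside : side = 3 + 2 * (k : Int) := rfl
  rw [hside] at _h
  have h1 : (3 + 2 * ((k : Int) + 1) - 2) ^ 2 = (3 + 2 * (k : Int) - 2) ^ 2 + (8 * (k : Int) + 8) := by
    ring
  push_cast at *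
  omega

def spiral_printing_alt (size : Int) : List Int := 1 :: spiralB size 0

-- ===== PRECONDITION & SPEC =====
def Spec_spiral_printing (size : Int) (out : List Int) : Prop := out = spiral_printing_alt size
instance (size : Int) (out : List Int) : Decidable (Spec_spiral_printing size out) := by unfold Spec_spiral_printing; infer_instance

-- ===== CLAIM (what is proved, stated in full; the proofs are below) =====
def Claim_equal_spiral_printing : Prop := ∀ (size : Int), Dom_spiral_printing size → Spec_spiral_printing size (spiral_printing size)

-- ===== LEMMAS AND PROOFS =====

-- A's accumulator i equals (side-2)^2 = (1+2k)^2 at the top of each ring.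
theorem spiralA_eq_spiralB (size : Int) (k : Nat) :
    spiralA size ((1 + 2 * (k : Int)) ^ 2) k = spiralB size k := by
  rw [spiralA, spiralB]
  have hguard : (3 + 2 * (k : Int) - 2) ^ 2 = (1 + 2 * (k : Int)) ^ 2 := by ring
  rw [hguard]
  split
  · have ih := spiralA_eq_spiralB size (k + 1)
    have hrec : (1 + 2 * (k : Int)) ^ 2 + (3 + 2 * (k : Int) - 1) + (3 + 2 * (k : Int) - 1)
        + (3 + 2 * (k : Int) - 1) + (3 + 2 * (k : Int) - 1) = (1 + 2 * ((k + 1 : Nat) : Int)) ^ 2 := by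
      push_cast; ring
    have e1 : (1 + 2 * (k : Int)) ^ 2 + (3 + 2 * (k : Int) - 1)
        = (3 + 2 * (k : Int)) * (3 + 2 * (k : Int)) - 3 * (3 + 2 * (k : Int) - 1) := by ring
    have e2 : (1 + 2 * (k : Int)) ^ 2 + (3 + 2 * (k : Int) - 1) + (3 + 2 * (k : Int) - 1)
        = (3 + 2 * (k : Int)) * (3 + 2 * (k : Int)) - 2 * (3 + 2 * (k : Int) - 1) := by ring
    have e3 : (1 + 2 * (k : Int)) ^ 2 + (3 + 2 * (k : Int) - 1) + (3 + 2 * (k : Int) - 1)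
        + (3 + 2 * (k : Int) - 1)
        = (3 + 2 * (k : Int)) * (3 + 2 * (k : Int)) - (3 + 2 * (k : Int) - 1) := by ring
    have e4 : (1 + 2 * ((k + 1 : Nat) : Int)) ^ 2
        = (3 + 2 * (k : Int)) * (3 + 2 * (k : Int)) := by push_cast; ring
    simp only []
    rw [hrec, ih, e3, e2, e1, e4]
  · rfl
termination_by (size ^ 2 - (1 + 2 * (k : Int)) ^ 2).toNat
decreasing_by
  have hk : (0 : Int) ≤ (k : Int) := Int.natCast_nonneg k
  have h1 : (1 + 2 * ((k : Int) + 1)) ^ 2 = (1 + 2 * (k : Int)) ^ 2 + (8 * (k : Int) + 8) := by ring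
  push_cast at *
  omega

-- ===== VERDICT (by name: the statement is the Claim_ definition above) =====
theorem spiral_printing_spec : Claim_equal_spiral_printing := by
  intro size _
  unfold Spec_spiral_printing spiral_printing spiral_printing_alt
  have h := spiralA_eq_spiralB size 0
  norm_num at h
  rw [h]
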